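-- pv_equiv track=rewrite | github.com/NeilWangziyu/JZOffer | 14.py | maxProductAfterCutting
-- ===== SOURCE A (Python) =====
-- def maxProductAfterCutting(length):
--     if length == 2:
--         return 1
--     if length == 3:
--         return 2
--
--     Dp = [0 for _ in range(length+1)]
--     Dp[2] = 1
--     Dp[3] = 2
--     for i in range(4, length+1):
--         for j in range(2, i):
--             Dp[i] = max(max(j*(i-j), Dp[j]*(i-j)), Dp[i])
--     return Dp[-1]
-- ===== SOURCE B (Python) =====
-- def maxProductAfterCutting(length):
--     # Greedy closed form: cut into as many 3s as possible; remainder 1 -> use a 4 (2*2), remainder 2 -> one extra factor 2.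
--     if length == 2:
--         return 1
--     if length == 3:
--         return 2
--     q, r = divmod(length, 3)
--     if r == 0:
--         return 3 ** q
--     if r == 1:
--         return 3 ** (q - 1) * 4
--     return 3 ** q * 2
-- ===== Notes on version B (the rewrite author's own statement) =====
-- stated objective: faster
-- what changed: Replaced the O(n^2) bottom-up DP table with the closed-form greedy rule (cut into 3s; remainder 1 uses a 4, remainder 2 an extra 2) computed by one divmod and one integer power.
import Mathlib
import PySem

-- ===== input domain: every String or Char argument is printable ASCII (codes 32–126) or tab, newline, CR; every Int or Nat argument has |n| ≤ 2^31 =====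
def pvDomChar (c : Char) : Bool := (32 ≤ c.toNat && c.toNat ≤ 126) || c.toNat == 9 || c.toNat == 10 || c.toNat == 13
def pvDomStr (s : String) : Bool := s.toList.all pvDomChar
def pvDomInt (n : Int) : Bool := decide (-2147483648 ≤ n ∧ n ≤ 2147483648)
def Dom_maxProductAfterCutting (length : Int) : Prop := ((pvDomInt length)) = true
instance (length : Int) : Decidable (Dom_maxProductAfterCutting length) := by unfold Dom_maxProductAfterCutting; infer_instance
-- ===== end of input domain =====

-- B replaces A's O(n^2) dynamic-programming table by the closed-form greedy rule
-- (cut into 3s; remainder 1 uses a 4, remainder 2 an extra 2): objective = faster.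


-- ===== PORT A =====
-- A-side helpers: the two loop bodies of A's nested loops, named for the fold.
-- inner loop body: Dp[i] = max(max(j*(i-j), Dp[j]*(i-j)), Dp[i])
def innerStepA (i : Int) (dp : List Int) (j : Int) : List Int :=
  dp.set i.toNat (max (max (j * (i - j)) (PySem.List.pyGetD dp j 0 * (i - j)))
    (PySem.List.pyGetD dp i 0))
-- outer loop body: for j in range(2, i): …
def outerStepA (dp : List Int) (i : Int) : List Int :=
  (PySem.List.pyRange 2 i).foldl (innerStepA i) dp
-- Dp = [0]*(length+1); Dp[2] = 1; Dp[3] = 2  (in range whenever length ≥ 3; Python raises below, excluded by Pre_)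
def dpInitA (length : Int) : List Int :=
  (((PySem.List.pyRange 0 (length + 1)).map (fun _ => (0 : Int))).set 2 1).set 3 2

def maxProductAfterCutting (length : Int) : Int :=
  if length = 2 then 1
  else if length = 3 then 2
  else
    (PySem.List.pyGet? ((PySem.List.pyRange 4 (length + 1)).foldl outerStepA (dpInitA length))
      (-1)).getD 0

-- ===== PORT B =====
-- 3 ** q is ported as (3:Int) ^ q.toNat: inside Pre_ the exponents are ≥ 0 (length ≥ 4 in this branch).
def maxProductAfterCutting_alt (length : Int) : Int :=
  if length = 2 then 1
  else if length = 3 then 2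
  else
    let q := PySem.Int.floordiv length 3
    let r := PySem.Int.mod length 3
    if r = 0 then 3 ^ q.toNat
    else if r = 1 then 3 ^ (q - 1).toNat * 4
    else 3 ^ q.toNat * 2

-- ===== PRECONDITION & SPEC =====
-- A raises IndexError for length < 2 (Dp[2] = 1 on a too-short list); excluded.
def Pre_maxProductAfterCutting (length : Int) : Prop := 2 ≤ length
instance (length : Int) : Decidable (Pre_maxProductAfterCutting length) := by
  unfold Pre_maxProductAfterCutting; infer_instance
def pvWitness_maxProductAfterCutting : Int := 5

def Spec_maxProductAfterCutting (length : Int) (out : Int) : Prop := out = maxProductAfterCutting_alt length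
instance (length : Int) (out : Int) : Decidable (Spec_maxProductAfterCutting length out) := by unfold Spec_maxProductAfterCutting; infer_instance

-- ===== CLAIM (what is proved, stated in full; the proofs are below) =====
def Claim_equal_maxProductAfterCutting : Prop := ∀ (length : Int), Dom_maxProductAfterCutting length → Pre_maxProductAfterCutting length → Spec_maxProductAfterCutting length (maxProductAfterCutting length)

-- ===== LEMMAS AND PROOFS =====

-- the closed-form value of the best product when the piece of size n may also stay uncut (n ≥ 4: cutting wins or ties)
def G (n : Nat) : Int :=
  if n % 3 = 0 then 3 ^ (n / 3)
  else if n % 3 = 1 then (if n = 1 then 1 else 4 * 3 ^ (n / 3 - 1))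
  else 2 * 3 ^ (n / 3)

-- the value A's table holds at index n (n ≥ 2): cutting is mandatory, so F 2 = 1, F 3 = 2
def F (n : Nat) : Int := if n = 2 then 1 else if n = 3 then 2 else G n

lemma G_eq0 (s : Nat) : G (3 * s) = 3 ^ s := by
  unfold G
  have h1 : (3 * s) % 3 = 0 := by omega
  have h2 : (3 * s) / 3 = s := by omega
  simp [h1, h2]

lemma G_eq1 (s : Nat) (hs : 1 ≤ s) : G (3 * s + 1) = 4 * 3 ^ (s - 1) := by
  unfold G
  have h1 : (3 * s + 1) % 3 = 1 := by omega
  have h2 : (3 * s + 1) / 3 = s := by omega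
  have h3 : 3 * s + 1 ≠ 1 := by omega
  simp only [h1, h2, h3, if_true, if_false]
  norm_num

lemma G_eq2 (s : Nat) : G (3 * s + 2) = 2 * 3 ^ s := by
  unfold G
  have h1 : (3 * s + 2) % 3 = 2 := by omega
  have h2 : (3 * s + 2) / 3 = s := by omega
  simp [h1, h2]

lemma G_step3 (n : Nat) (hn : 4 ≤ n) : G (n + 3) = 3 * G n := by
  obtain ⟨s, r, hr, rfl⟩ : ∃ s r, r < 3 ∧ n = 3 * s + r := ⟨n / 3, n % 3, by omega, by omega⟩
  interval_cases r
  · simp only [Nat.add_zero]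
    have h : 3 * s + 3 = 3 * (s + 1) := by ring
    rw [h, G_eq0, G_eq0, pow_succ]; ring
  · have hs : 1 ≤ s := by omega
    have h : 3 * s + 1 + 3 = 3 * (s + 1) + 1 := by ring
    rw [h, G_eq1 (s+1) (by omega), G_eq1 s hs]
    have h2 : s + 1 - 1 = (s - 1) + 1 := by omega
    rw [h2, pow_succ]; ring
  · have h : 3 * s + 2 + 3 = 3 * (s + 1) + 2 := by ring
    rw [h, G_eq2, G_eq2, pow_succ]; ring

lemma G_self : ∀ n : Nat, 1 ≤ n → (n : Int) ≤ G n := by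
  intro n
  induction n using Nat.strong_induction_on with
  | _ n ih =>
    intro hn
    by_cases h7 : n ≤ 6
    · interval_cases n <;> decide
    · obtain ⟨c, rfl⟩ : ∃ c, n = c + 3 := ⟨n - 3, by omega⟩
      have h4 : 4 ≤ c := by omega
      have hc := ih c (by omega) (by omega)
      rw [G_step3 _ h4]
      push_cast
      linarith

lemma G_pos (n : Nat) (hn : 1 ≤ n) : 0 < G n := by
  have h1 : (1 : Int) ≤ (n : Int) := by exact_mod_cast hn
  linarith [G_self n hn]

lemma G_mul : ∀ N a b : Nat, a + b ≤ N → 1 ≤ a → 1 ≤ b → G a * G b ≤ G (a + b) := by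
  intro N
  induction N with
  | zero => intro a b h ha hb; omega
  | succ N ih =>
    intro a b h ha hb
    by_cases ha7 : 7 ≤ a
    · obtain ⟨c, rfl⟩ : ∃ c, a = c + 3 := ⟨a - 3, by omega⟩
      have h4 : 4 ≤ c := by omega
      have hIH := ih c b (by omega) (by omega) hb
      have hs4 : 4 ≤ c + b := by omega
      have heqs : c + 3 + b = (c + b) + 3 := by omega
      rw [heqs, G_step3 _ hs4, G_step3 _ h4]
      have hGb := G_pos b hb
      nlinarith [hIH]
    · by_cases hb7 : 7 ≤ b
      · obtain ⟨c, rfl⟩ : ∃ c, b = c + 3 := ⟨b - 3, by omega⟩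
        have h4 : 4 ≤ c := by omega
        have hIH := ih a c (by omega) ha (by omega)
        have hs4 : 4 ≤ a + c := by omega
        have heqs : a + (c + 3) = (a + c) + 3 := by omega
        rw [heqs, G_step3 _ hs4, G_step3 _ h4]
        have hGa := G_pos a ha
        nlinarith [hIH]
      · have ha6 : a ≤ 6 := by omega
        have hb6 : b ≤ 6 := by omega
        interval_cases a <;> interval_cases b <;> decide

-- the inner-loop term for piece j: max(j, F j) = G j for 2 ≤ j
lemma max_F_eq_G (j : Nat) (hj : 2 ≤ j) : max (j : Int) (F j) = G j := by
  by_cases h2 : j = 2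
  · subst h2; decide
  · by_cases h3 : j = 3
    · subst h3; decide
    · have h4 : 4 ≤ j := by omega
      have hF : F j = G j := by unfold F; simp [h2, h3]
      rw [hF]
      exact max_eq_right (le_trans (le_refl _) (G_self j (by omega)))

-- upper bound: any single cut j + uncut rest is ≤ G i
lemma term_le (i j : Nat) (_hi : 4 ≤ i) (hj2 : 2 ≤ j) (hji : j < i) :
    G j * ((i : Int) - (j : Int)) ≤ G i := by
  have hb : 1 ≤ i - j := by omega
  have hcast : (i : Int) - (j : Int) = ((i - j : Nat) : Int) := by omega
  rw [hcast]
  calc G j * ((i - j : Nat) : Int) ≤ G j * G (i - j) := by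
        have := G_pos j (by omega)
        have := G_self (i - j) hb
        nlinarith
    _ ≤ G (j + (i - j)) := G_mul (j + (i - j)) j (i - j) (le_refl _) (by omega) hb
    _ = G i := by congr 1; omega

-- attainment: some cut j achieves G i
lemma term_attain (i : Nat) (hi : 4 ≤ i) :
    ∃ j : Nat, 2 ≤ j ∧ j < i ∧ G j * ((i : Int) - (j : Int)) = G i := by
  by_cases h7 : 7 ≤ i
  · obtain ⟨c, rfl⟩ : ∃ c, i = c + 3 := ⟨i - 3, by omega⟩
    refine ⟨c, by omega, by omega, ?_⟩
    have hcast : ((c + 3 : Nat) : Int) - (c : Int) = 3 := by push_cast; ring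
    rw [hcast, G_step3 _ (by omega)]
    ring
  · interval_cases i
    · exact ⟨2, by omega, by omega, by decide⟩
    · exact ⟨2, by omega, by omega, by decide⟩
    · exact ⟨3, by omega, by omega, by decide⟩

-- generic: a foldl of 'max (t j) ·' equals M when all terms are ≤ M and M is attained (or was the start)
lemma foldl_max_eq (t : Int → Int) :
    ∀ (l : List Int) (init M : Int), init ≤ M → (∀ j ∈ l, t j ≤ M) →
      ((∃ j ∈ l, t j = M) ∨ init = M) →
      l.foldl (fun m j => max (t j) m) init = M := by
  intro l
  induction l with
  | nil =>
    intro init M _ _ hatt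
    rcases hatt with ⟨j, hj, _⟩ | h
    · simp at hj
    · simpa using h
  | cons x l ih =>
    intro init M hle hbound hatt
    simp only [List.foldl_cons]
    have hx : t x ≤ M := hbound x (by simp)
    rcases hatt with ⟨j, hj, hjM⟩ | h
    · rcases List.mem_cons.mp hj with rfl | hj'
      · exact ih _ M (by rw [hjM]; exact max_le (le_refl M) hle)
          (fun j hj => hbound j (by simp [hj])) (Or.inr (by rw [hjM]; exact max_eq_left hle))
      · exact ih _ M (le_trans (max_le hx hle) (le_refl M))
          (fun j hj => hbound j (by simp [hj])) (Or.inl ⟨j, hj', hjM⟩)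
    · exact ih _ M (max_le hx h.le) (fun j hj => hbound j (by simp [hj]))
        (Or.inr (by rw [h]; exact max_eq_right hx))

lemma pyGetD_set_ne (dp : List Int) (k : Nat) (v : Int) (j : Int) (d : Int)
    (hj : 0 ≤ j) (hne : j.toNat ≠ k) :
    PySem.List.pyGetD (dp.set k v) j d = PySem.List.pyGetD dp j d := by
  rw [PySem.List.pyGetD_of_nonneg _ _ hj, PySem.List.pyGetD_of_nonneg _ _ hj]
  simp [List.getD, List.getElem?_set_ne (by omega : k ≠ j.toNat)]

lemma pyGetD_set_self (dp : List Int) (k : Nat) (v : Int) (d : Int) (hk : k < dp.length) :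
    PySem.List.pyGetD (dp.set k v) (k : Int) d = v := by
  rw [PySem.List.pyGetD_natCast]
  simp [List.getD, hk]

-- the inner fold only writes index i; it equals one set of i to a scalar fold reading the ORIGINAL dp
lemma inner_scalar (i : Nat) :
    ∀ (js : List Int) (dp : List Int), i < dp.length → (∀ j ∈ js, 0 ≤ j ∧ j.toNat < i) →
      js.foldl (innerStepA (i : Int)) dp
      = dp.set i (js.foldl
          (fun m j => max (max (j * ((i : Int) - j)) (PySem.List.pyGetD dp j 0 * ((i : Int) - j))) m)
          (PySem.List.pyGetD dp (i : Int) 0)) := by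
  intro js
  induction js with
  | nil =>
    intro dp hlen _
    simp [List.getElem?_eq_getElem hlen]
  | cons x l ih =>
    intro dp hlen hmem
    obtain ⟨hx0, hxi⟩ := hmem x (by simp)
    simp only [List.foldl_cons]
    have hstep : innerStepA (i : Int) dp x
        = dp.set i (max (max (x * ((i : Int) - x)) (PySem.List.pyGetD dp x 0 * ((i : Int) - x)))
            (PySem.List.pyGetD dp (i : Int) 0)) := by
      unfold innerStepA; rw [Int.toNat_natCast]
    rw [hstep]
    set v1 := max (max (x * ((i : Int) - x)) (PySem.List.pyGetD dp x 0 * ((i : Int) - x)))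
      (PySem.List.pyGetD dp (i : Int) 0) with hv1
    rw [ih (dp.set i v1) (by simpa using hlen) (fun j hj => hmem j (by simp [hj]))]
    rw [List.set_set]
    congr 1
    have hread : ∀ j ∈ l, PySem.List.pyGetD (dp.set i v1) j 0 = PySem.List.pyGetD dp j 0 := by
      intro j hj
      obtain ⟨hj0, hji⟩ := hmem j (by simp [hj])
      exact pyGetD_set_ne dp i v1 j 0 hj0 (by omega)
    rw [pyGetD_set_self dp i v1 0 hlen]
    exact PySem.List.foldl_congr_mem l _ _ v1 (fun acc j hj => by rw [hread j hj])

-- invariant of A's table after the outer loop has processed i = 4, …, m-1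
def InvA (n m : Nat) (dp : List Int) : Prop :=
  dp.length = n + 1 ∧ (∀ k : Nat, 2 ≤ k → k < m → PySem.List.pyGetD dp (k : Int) 0 = F k) ∧
    (∀ k : Nat, m ≤ k → k ≤ n → PySem.List.pyGetD dp (k : Int) 0 = 0)

lemma init_inv (n : Nat) (hn : 4 ≤ n) : InvA n 4 (dpInitA (n : Int)) := by
  have hmap : ((PySem.List.pyRange 0 ((n : Int) + 1)).map (fun _ => (0 : Int)))
      = List.replicate (n + 1) 0 := by
    rw [List.map_const']
    congr 1
    rw [PySem.List.length_pyRange_one]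
    omega
  unfold dpInitA
  rw [hmap]
  refine ⟨by simp, ?_, ?_⟩
  · intro k hk2 hk4
    rw [PySem.List.pyGetD_natCast]
    interval_cases k
    · simp [List.getD, show 2 ≤ n by omega]
      rfl
    · simp [List.getD, show 3 ≤ n by omega]
      rfl
  · intro k hk hkn
    rw [PySem.List.pyGetD_natCast]
    simp [List.getD,
      show 3 ≠ k by omega, show 2 ≠ k by omega, show k < n + 1 by omega]

lemma step_inv (n m : Nat) (hm : 4 ≤ m) (hmn : m ≤ n) (dp : List Int) (h : InvA n m dp) :
    InvA n (m + 1) (outerStepA dp (m : Int)) := by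
  obtain ⟨hlen, hF, h0⟩ := h
  have hmlen : m < dp.length := by omega
  have hmem : ∀ j ∈ PySem.List.pyRange 2 (m : Int), 0 ≤ j ∧ j.toNat < m := by
    intro j hj
    rw [PySem.List.mem_pyRange_one] at hj
    constructor
    · omega
    · omega
  unfold outerStepA
  rw [inner_scalar m _ dp hmlen hmem]
  have hinit : PySem.List.pyGetD dp (m : Int) 0 = 0 := h0 m (le_refl m) hmn
  rw [hinit]
  -- the scalar fold computes G m
  have hterm : ∀ jn : Nat, 2 ≤ jn → jn < m →
      max ((jn : Int) * ((m : Int) - (jn : Int))) (PySem.List.pyGetD dp (jn : Int) 0 * ((m : Int) - (jn : Int)))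
        = G jn * ((m : Int) - (jn : Int)) := by
    intro jn hjn2 hjnm
    rw [hF jn hjn2 hjnm,
      ← max_mul_of_nonneg _ _ (by omega : (0:Int) ≤ (m : Int) - (jn : Int)),
      max_F_eq_G jn hjn2]
  have hfold : (PySem.List.pyRange 2 (m : Int)).foldl
      (fun acc j => max (max (j * ((m : Int) - j)) (PySem.List.pyGetD dp j 0 * ((m : Int) - j))) acc) 0
      = G m := by
    apply foldl_max_eq (fun j => max (j * ((m : Int) - j)) (PySem.List.pyGetD dp j 0 * ((m : Int) - j)))
    · exact (G_pos m (by omega)).le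
    · intro j hj
      rw [PySem.List.mem_pyRange_one] at hj
      obtain ⟨jn, rfl⟩ : ∃ jn : Nat, j = (jn : Int) :=
        ⟨j.toNat, (Int.toNat_of_nonneg (by omega)).symm⟩
      have hjn2 : 2 ≤ jn := by exact_mod_cast hj.1
      have hjnm : jn < m := by exact_mod_cast hj.2
      rw [hterm jn hjn2 hjnm]
      exact term_le m jn hm hjn2 hjnm
    · left
      obtain ⟨jn, hjn2, hjnm, hjnv⟩ := term_attain m hm
      have hmem' : (jn : Int) ∈ PySem.List.pyRange 2 (m : Int) := by
        rw [PySem.List.mem_pyRange_one]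
        exact ⟨by exact_mod_cast hjn2, by exact_mod_cast hjnm⟩
      exact ⟨(jn : Int), hmem', by rw [hterm jn hjn2 hjnm]; exact hjnv⟩
  rw [hfold]
  refine ⟨by simp [hlen], ?_, ?_⟩
  · intro k hk2 hkm
    by_cases hkm' : k = m
    · subst hkm'
      rw [pyGetD_set_self dp k (G k) 0 hmlen]
      unfold F
      simp [show k ≠ 2 by omega, show k ≠ 3 by omega]
    · rw [pyGetD_set_ne dp m (G m) (k : Int) 0 (by omega) (by simp; omega)]
      exact hF k hk2 (by omega)
  · intro k hk hkn
    rw [pyGetD_set_ne dp m (G m) (k : Int) 0 (by omega) (by simp; omega)]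
    exact h0 k (by omega) hkn

lemma outer_inv (n : Nat) (hn : 4 ≤ n) :
    ∀ m : Nat, 4 ≤ m → m ≤ n + 1 →
      InvA n m ((PySem.List.pyRange 4 (m : Int)).foldl outerStepA (dpInitA (n : Int))) := by
  intro m hm hmn
  induction m, hm using Nat.le_induction with
  | base =>
    rw [PySem.List.pyRange_one_eq_nil (by norm_num)]
    exact init_inv n hn
  | succ m hm ih =>
    have hcast : ((m + 1 : Nat) : Int) = (m : Int) + 1 := by push_cast; ring
    rw [hcast, PySem.List.pyRange_one_succ_right (by exact_mod_cast hm.trans (by omega) : (4:Int) ≤ (m:Int)), List.foldl_append]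
    simp only [List.foldl_cons, List.foldl_nil]
    exact step_inv n m hm (by omega) _ (ih (by omega))

lemma last_eq (dp : List Int) (n : Nat) (h : dp.length = n + 1) :
    (PySem.List.pyGet? dp (-1)).getD 0 = PySem.List.pyGetD dp (n : Int) 0 := by
  simp [PySem.List.pyGetD, PySem.List.pyGet?, PySem.List.pyIdx?, h]

lemma A_eq_G (n : Nat) (hn : 4 ≤ n) : maxProductAfterCutting (n : Int) = G n := by
  unfold maxProductAfterCutting
  rw [if_neg (by omega), if_neg (by omega)]
  obtain ⟨hlen, hval, -⟩ := outer_inv n hn (n + 1) (by omega) (by omega)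
  rw [show ((n : Int) + 1) = ((n + 1 : Nat) : Int) by push_cast; ring]
  rw [last_eq _ n hlen, hval n (by omega) (by omega)]
  unfold F
  simp [show n ≠ 2 by omega, show n ≠ 3 by omega]

lemma B_eq_G (n : Nat) (hn : 4 ≤ n) : maxProductAfterCutting_alt (n : Int) = G n := by
  unfold maxProductAfterCutting_alt
  rw [if_neg (by omega), if_neg (by omega)]
  have hfd : PySem.Int.floordiv (n : Int) 3 = ((n / 3 : Nat) : Int) := by
    exact_mod_cast PySem.Int.floordiv_natCast n 3
  have hmod : PySem.Int.mod (n : Int) 3 = ((n % 3 : Nat) : Int) := by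
    exact_mod_cast PySem.Int.mod_natCast n 3
  simp only [hfd, hmod]
  obtain ⟨s, r, hr, rfl⟩ : ∃ s r, r < 3 ∧ n = 3 * s + r := ⟨n / 3, n % 3, by omega, by omega⟩
  interval_cases r
  · simp only [show (3 * s + 0) % 3 = 0 by omega, show (3 * s + 0) / 3 = s by omega,
      Nat.cast_zero, Int.toNat_natCast, if_pos trivial]
    rw [show 3 * s + 0 = 3 * s by ring, G_eq0]
  · have hs : 1 ≤ s := by omega
    simp only [show (3 * s + 1) % 3 = 1 by omega, show (3 * s + 1) / 3 = s by omega]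
    rw [if_neg (by norm_num), if_pos (by norm_num)]
    rw [G_eq1 s hs]
    rw [show ((s : Nat) : Int) - 1 = (((s - 1 : Nat)) : Int) by omega, Int.toNat_natCast]
    ring
  · simp only [show (3 * s + 2) % 3 = 2 by omega, show (3 * s + 2) / 3 = s by omega]
    rw [if_neg (by norm_num), if_neg (by norm_num), Int.toNat_natCast, G_eq2]
    ring

-- ===== VERDICT (by name: the statement is the Claim_ definition above) =====
theorem maxProductAfterCutting_spec : Claim_equal_maxProductAfterCutting := by
  intro length _ hpre
  unfold Spec_maxProductAfterCutting
  by_cases h2 : length = 2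
  · subst h2; rfl
  · by_cases h3 : length = 3
    · subst h3; rfl
    · have h4 : 4 ≤ length := by
        unfold Pre_maxProductAfterCutting at hpre; omega
      have hn : length = ((length.toNat : Nat) : Int) := by omega
      rw [hn, A_eq_G _ (by omega), B_eq_G _ (by omega)]
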